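-- pv_equiv track=rewrite | github.com/LucaCtt/LibreLog | libre_log/parser.py | __check_predefined_logs
-- ===== SOURCE A (Python) =====
-- def get_logs_from_group(group_list):
--     """
--     Extract logs from a list of group dictionaries.
--
--     Args:
--         group_list (list): A list of dictionaries containing log information.
--
--     Returns:
--         list: A list of log contents extracted from the group dictionaries.
--     """
--     logs_from_group = []
--     for ele in group_list:
--         logs_from_group.append(ele["Content"])
--     return logs_from_group
--
-- def __check_predefined_logs(log_list, is_dict=False):
--     """
--     Check if the log list contains pre-defined logs.
--
--     Args:
--         log_list (list): A list of log strings or dictionaries containing logs.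
--         is_dict (bool, optional): Flag to indicate if logs are in dictionary format. Defaults to False.
--
--     Returns:
--         bool: True if the log list contains pre-defined logs, False otherwise.
--     """
--     if is_dict:
--         log_list = get_logs_from_group(log_list)
--     unique_logs = list(set(log_list))
--     first_log = unique_logs[0]
--     if len(unique_logs) != 1:
--         return False
--     elif (
--         (" is " in first_log)
--         or ("=" in first_log)
--         or (" to " in first_log)
--         or ("_" in first_log)
--         or ("-" in first_log)
--         or (":" in first_log)
--         or ("." in first_log)
--         or any(char.isdigit() for char in first_log)
--     ):
--         return False
--     return True
-- ===== SOURCE B (Python) =====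
-- # B: uniqueness by an adjacent-pairs zip chain and all token/digit checks fused
-- # into ONE indexed character scan of the anchor (window compare for " is "/" to "),
-- # instead of A's set build + seven separate substring scans + a digit scan.
-- def get_logs_from_group(group_list):
--     logs_from_group = []
--     for ele in group_list:
--         logs_from_group.append(ele["Content"])
--     return logs_from_group
--
-- def __check_predefined_logs(log_list, is_dict=False):
--     if is_dict:
--         log_list = get_logs_from_group(log_list)
--     first = log_list[0]
--     if any(a != b for a, b in zip(log_list, log_list[1:])):
--         return False
--     i = 0
--     n = len(first)
--     while i < n:
--         ch = first[i]
--         if ch in "=_-:." or ch.isdigit():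
--             return False
--         if ch == " " and first[i+1:i+4] in ("is ", "to "):
--             return False
--         i += 1
--     return True
-- ===== Notes on version B (the rewrite author's own statement) =====
-- stated objective: alternative
-- what changed: B drops A's set construction and the seven separate substring scans: uniqueness is decided by comparing adjacent pairs (zip of the list with its tail), and all forbidden-token and digit tests are fused into a single indexed character scan of the anchor that window-compares first[i+1:i+4] for ' is '/' to '. Pre_ excludes only the raising inputs: the empty list (IndexError) and is_dict=True (TypeError on string elements).
-- outside the precondition, e.g. on __check_predefined_logs([], False): A raises IndexError, B raises IndexError
import Mathlib
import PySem

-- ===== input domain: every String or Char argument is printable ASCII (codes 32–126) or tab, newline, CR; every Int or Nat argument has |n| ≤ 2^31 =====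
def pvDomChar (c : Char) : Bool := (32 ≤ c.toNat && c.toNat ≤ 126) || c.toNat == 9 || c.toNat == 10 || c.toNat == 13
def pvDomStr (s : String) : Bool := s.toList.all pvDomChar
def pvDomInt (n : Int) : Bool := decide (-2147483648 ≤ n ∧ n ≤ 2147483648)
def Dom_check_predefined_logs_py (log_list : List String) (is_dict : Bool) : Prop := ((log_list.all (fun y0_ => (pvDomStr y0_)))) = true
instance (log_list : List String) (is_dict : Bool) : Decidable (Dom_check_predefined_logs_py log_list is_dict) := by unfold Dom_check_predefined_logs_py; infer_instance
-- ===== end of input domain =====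

-- B replaces A's set-length uniqueness test by an adjacent-pairs zip chain and fuses A's seven substring scans + digit scan into one indexed character scan of the anchor; equal on all non-raising inputs.


-- ===== PORT A =====
-- is_dict = true path: in Python get_logs_from_group does ele["Content"] on each string,
-- a TypeError on every nonempty list (and the empty list then hits the IndexError below);
-- excluded by Pre_, the guard below only makes the port total.
def check_predefined_logs_py (log_list : List String) (is_dict : Bool) : Bool :=
  if is_dict then false
  else
    let unique_logs : List String := PySem.Set.ofList log_list
    -- unique_logs[0]: IndexError on the empty list (excluded by Pre_). Python's set iteration
    -- order is arbitrary, but first_log is only consumed when unique_logs has exactly one element.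
    match PySem.List.pyGet? unique_logs 0 with
    | none => false
    | some first_log =>
      if unique_logs.length ≠ 1 then false
      else if PySem.Str.isIn " is " first_log || PySem.Str.isIn "=" first_log
           || PySem.Str.isIn " to " first_log || PySem.Str.isIn "_" first_log
           || PySem.Str.isIn "-" first_log || PySem.Str.isIn ":" first_log
           || PySem.Str.isIn "." first_log
           || first_log.toList.any (fun c => PySem.Chars.isdigit c) then false
      else true

-- ===== PORT B =====
-- ch in "=_-:." or ch.isdigit()
def pvBadChar (c : Char) : Bool :=
  c == '=' || c == '_' || c == '-' || c == ':' || c == '.' || PySem.Chars.isdigit c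

-- Source B's while loop over first: first[i] is pvScan's head, first[i+1:i+4] its cs.take 3
def pvScan : List Char → Bool
  | [] => true
  | c :: cs =>
    if pvBadChar c then false
    else if c == ' ' && (cs.take 3 == ['i', 's', ' '] || cs.take 3 == ['t', 'o', ' ']) then false
    else pvScan cs

def check_predefined_logs_py_alt (log_list : List String) (is_dict : Bool) : Bool :=
  if is_dict then false   -- same TypeError path as A; excluded by Pre_
  else
    match log_list with
    | [] => false          -- log_list[0]: IndexError; excluded by Pre_
    | first :: rest =>
      if ((first :: rest).zip rest).any (fun p => p.1 != p.2) then false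
      else pvScan first.toList

-- ===== PRECONDITION & SPEC =====
-- Pre_ excludes exactly the raising inputs: is_dict = true (TypeError in get_logs_from_group
-- on strings, or IndexError on []) and the empty list (IndexError at unique_logs[0] / log_list[0]).
def Pre_check_predefined_logs_py (log_list : List String) (is_dict : Bool) : Prop :=
  is_dict = false ∧ log_list ≠ []
instance (log_list : List String) (is_dict : Bool) : Decidable (Pre_check_predefined_logs_py log_list is_dict) := by unfold Pre_check_predefined_logs_py; infer_instance
def pvWitness_check_predefined_logs_py : List String × Bool := (["hello", "hello"], false)

def Spec_check_predefined_logs_py (log_list : List String) (is_dict : Bool) (out : Bool) : Prop := out = check_predefined_logs_py_alt log_list is_dict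
instance (log_list : List String) (is_dict : Bool) (out : Bool) : Decidable (Spec_check_predefined_logs_py log_list is_dict out) := by unfold Spec_check_predefined_logs_py; infer_instance

-- ===== CLAIM (what is proved, stated in full; the proofs are below) =====
def Claim_equal_check_predefined_logs_py : Prop := ∀ (log_list : List String) (is_dict : Bool), Dom_check_predefined_logs_py log_list is_dict → Pre_check_predefined_logs_py log_list is_dict → Spec_check_predefined_logs_py log_list is_dict (check_predefined_logs_py log_list is_dict)

-- ===== LEMMAS AND PROOFS =====

-- set(x::xs) has exactly one element iff every element equals the head.
lemma ofList_length_one_iff (x : String) (xs : List String) :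
    (PySem.Set.ofList (x :: xs)).length = 1 ↔ ∀ y ∈ xs, y = x := by
  rw [PySem.Set.ofList_cons]
  constructor
  · intro h y hy
    by_contra hne
    simp only [List.length_cons, Nat.add_eq_right] at h
    have hnil := List.length_eq_zero_iff.mp h
    have hmem : y ∈ PySem.Set.discard (PySem.Set.ofList xs) x := by
      simp [PySem.Set.mem_discard, PySem.Set.mem_ofList, hy, hne]
    rw [hnil] at hmem
    exact List.not_mem_nil hmem
  · intro h
    have hnil : PySem.Set.discard (PySem.Set.ofList xs) x = [] := by
      rw [List.eq_nil_iff_forall_not_mem]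
      intro y hy
      rw [PySem.Set.mem_discard, PySem.Set.mem_ofList] at hy
      exact hy.2 (h y hy.1)
    simp [hnil]

-- B's adjacent-pairs chain: no mismatching adjacent pair iff everything equals the head.
lemma zip_chain_eq (x : String) (xs : List String) :
    (((x :: xs).zip xs).any (fun p => p.1 != p.2)) = false ↔ ∀ y ∈ xs, y = x := by
  induction xs generalizing x with
  | nil => simp
  | cons y ys ih =>
    simp only [List.zip_cons_cons, List.any_cons, Bool.or_eq_false_iff, bne_eq_false_iff_eq,
      List.mem_cons, forall_eq_or_imp]
    constructor
    · rintro ⟨hxy, h⟩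
      exact ⟨hxy.symm, fun z hz => ((ih y).mp h z hz).trans hxy.symm⟩
    · rintro ⟨hyx, h⟩
      exact ⟨hyx.symm, (ih y).mpr (fun z hz => (h z hz).trans hyx.symm)⟩

-- the fused character scan succeeds iff none of A's tokens occurs and no bad char / digit is present
lemma pvScan_eq_true_iff (cs : List Char) :
    pvScan cs = true ↔
      ¬ ([' ', 'i', 's', ' '] <:+: cs) ∧ ¬ ([' ', 't', 'o', ' '] <:+: cs) ∧
      ∀ c ∈ cs, pvBadChar c = false := by
  induction cs with
  | nil => simp [pvScan]
  | cons c cs ih =>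
    rw [pvScan]
    split_ifs with hbad hsp
    · simp only [false_iff, not_and, not_forall]
      intro _ _
      exact ⟨c, List.mem_cons_self, by simp [hbad]⟩
    · simp only [Bool.and_eq_true, beq_iff_eq, Bool.or_eq_true] at hsp
      obtain ⟨rfl, hsp⟩ := hsp
      constructor
      · intro h; exact absurd h (by simp)
      · rintro ⟨h1, h2, -⟩
        rcases hsp with h | h
        · exact absurd (List.infix_cons_iff.mpr (Or.inl
            (List.cons_prefix_cons.mpr ⟨rfl, List.prefix_iff_eq_take.mpr h.symm⟩))) h1
        · exact absurd (List.infix_cons_iff.mpr (Or.inl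
            (List.cons_prefix_cons.mpr ⟨rfl, List.prefix_iff_eq_take.mpr h.symm⟩))) h2
    · rw [ih]
      have hsp' : ¬ (c = ' ' ∧ (cs.take 3 = ['i', 's', ' '] ∨ cs.take 3 = ['t', 'o', ' '])) := by
        intro ⟨h1, h2⟩; exact hsp (by simp [h1, h2])
      constructor
      · rintro ⟨h1, h2, h3⟩
        refine ⟨?_, ?_, ?_⟩
        · intro h
          rcases List.infix_cons_iff.mp h with h | h
          · obtain ⟨rfl, hp⟩ := List.cons_prefix_cons.mp h
            exact hsp' ⟨rfl, Or.inl (List.prefix_iff_eq_take.mp hp).symm⟩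
          · exact h1 h
        · intro h
          rcases List.infix_cons_iff.mp h with h | h
          · obtain ⟨rfl, hp⟩ := List.cons_prefix_cons.mp h
            exact hsp' ⟨rfl, Or.inr (List.prefix_iff_eq_take.mp hp).symm⟩
          · exact h2 h
        · intro d hd
          rcases List.mem_cons.mp hd with rfl | hd
          · simpa using hbad
          · exact h3 d hd
      · rintro ⟨h1, h2, h3⟩
        exact ⟨fun h => h1 (List.infix_cons h), fun h => h2 (List.infix_cons h),
               fun d hd => h3 d (List.mem_cons_of_mem _ hd)⟩

-- bad-character membership split into A's five single-char tokens and the digit scan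
lemma badchar_forall_iff (cs : List Char) :
    (∀ c ∈ cs, pvBadChar c = false) ↔
      ¬ ('=' ∈ cs) ∧ ¬ ('_' ∈ cs) ∧ ¬ ('-' ∈ cs) ∧ ¬ (':' ∈ cs) ∧ ¬ ('.' ∈ cs) ∧
      (cs.any (fun c => PySem.Chars.isdigit c)) = false := by
  simp only [List.any_eq_false]
  constructor
  · intro h
    refine ⟨fun hm => ?_, fun hm => ?_, fun hm => ?_, fun hm => ?_, fun hm => ?_,
      fun c hc => ?_⟩
    · have := h _ hm; simp [pvBadChar] at this
    · have := h _ hm; simp [pvBadChar] at this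
    · have := h _ hm; simp [pvBadChar] at this
    · have := h _ hm; simp [pvBadChar] at this
    · have := h _ hm; simp [pvBadChar] at this
    · have := h c hc; simp [pvBadChar] at this; simp [this]
  · rintro ⟨h1, h2, h3, h4, h5, h6⟩ c hc
    have hd := Bool.eq_false_iff.mpr (h6 c hc)
    simp only [pvBadChar, Bool.or_eq_false_iff, beq_eq_false_iff_ne]
    exact ⟨⟨⟨⟨⟨fun h => h1 (h ▸ hc), fun h => h2 (h ▸ hc)⟩, fun h => h3 (h ▸ hc)⟩,
      fun h => h4 (h ▸ hc)⟩, fun h => h5 (h ▸ hc)⟩, hd⟩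

-- A's eight-way or is false exactly when B's fused scan succeeds
lemma tokens_eq_scan (s : String) :
    (if PySem.Str.isIn " is " s || PySem.Str.isIn "=" s
      || PySem.Str.isIn " to " s || PySem.Str.isIn "_" s
      || PySem.Str.isIn "-" s || PySem.Str.isIn ":" s
      || PySem.Str.isIn "." s
      || s.toList.any (fun c => PySem.Chars.isdigit c) then false else true) = pvScan s.toList := by
  have e1 : " is ".toList = [' ', 'i', 's', ' '] := rfl
  have e2 : " to ".toList = [' ', 't', 'o', ' '] := rfl
  have e3 : "=".toList = ['='] := rfl
  have e4 : "_".toList = ['_'] := rfl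
  have e5 : "-".toList = ['-'] := rfl
  have e6 : ":".toList = [':'] := rfl
  have e7 : ".".toList = ['.'] := rfl
  split_ifs with h
  · symm
    rw [Bool.eq_false_iff]
    intro hscan
    obtain ⟨his, hto, hbad⟩ := (pvScan_eq_true_iff s.toList).mp hscan
    obtain ⟨h1, h2, h3, h4, h5, h6⟩ := (badchar_forall_iff s.toList).mp hbad
    simp only [Bool.or_eq_true, PySem.Str.isIn_iff_infix, e1, e2, e3, e4, e5, e6, e7,
      List.singleton_infix_iff] at h
    rcases h with ((((((h | h) | h) | h) | h) | h) | h) | h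
    · exact his h
    · exact h1 h
    · exact hto h
    · exact h2 h
    · exact h3 h
    · exact h4 h
    · exact h5 h
    · exact absurd h (by simp [h6])
  · symm
    rw [pvScan_eq_true_iff, badchar_forall_iff]
    simp only [Bool.or_eq_true, not_or, PySem.Str.isIn_iff_infix, e1, e2, e3, e4, e5, e6, e7,
      List.singleton_infix_iff] at h
    obtain ⟨⟨⟨⟨⟨⟨⟨his, heq⟩, hto⟩, hun⟩, hmi⟩, hco⟩, hdo⟩, hdig⟩ := h
    exact ⟨his, hto, heq, hun, hmi, hco, hdo, by simpa using hdig⟩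

-- ===== VERDICT (by name: the statement is the Claim_ definition above) =====
theorem check_predefined_logs_py_spec : Claim_equal_check_predefined_logs_py := by
  intro log_list is_dict _ hpre
  obtain ⟨hdict, hne⟩ := hpre
  subst hdict
  obtain ⟨x, xs, rfl⟩ := List.exists_cons_of_ne_nil hne
  show check_predefined_logs_py (x :: xs) false = check_predefined_logs_py_alt (x :: xs) false
  unfold check_predefined_logs_py check_predefined_logs_py_alt
  have hget : PySem.List.pyGet? (x :: PySem.Set.discard (PySem.Set.ofList xs) x) (0 : Int)
      = some x := by simp [PySem.List.pyGet?, PySem.List.pyIdx?]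
  simp only [Bool.false_eq_true, if_false, PySem.Set.ofList_cons, hget]
  have hlen := ofList_length_one_iff x xs
  rw [PySem.Set.ofList_cons] at hlen
  by_cases hall : ∀ y ∈ xs, y = x
  · have h1 : ¬ (x :: PySem.Set.discard (PySem.Set.ofList xs) x).length ≠ 1 := by
      simp [hlen.mpr hall]
    rw [if_neg h1, (zip_chain_eq x xs).mpr hall, tokens_eq_scan]
    simp
  · have h1 : (x :: PySem.Set.discard (PySem.Set.ofList xs) x).length ≠ 1 := by
      intro h; exact hall (hlen.mp h)
    have hany : (((x :: xs).zip xs).any (fun p => p.1 != p.2)) = true := by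
      rcases Bool.eq_false_or_eq_true (((x :: xs).zip xs).any (fun p => p.1 != p.2)) with h | h
      · exact h
      · exact absurd ((zip_chain_eq x xs).mp h) hall
    rw [if_pos h1, hany, if_pos rfl]
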